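-- pv_equiv track=rewrite | github.com/WonHwang/1D1P_2 | programmers_lv3_2.py | solution
-- ===== SOURCE A (Python) =====
-- def solution(n, works):
--     answer = 0
--     total = sum(works)
--     if total <= n:
--         pass
--     else:
--         total -= n
--         rest = [(total // len(works))] * len(works)
--         for i in range(total%len(works)):
--             rest[i] += 1
--
--         for num in rest:
--             answer += num**2
--
--     return answer
-- ===== SOURCE B (Python) =====
-- def solution(n, works):
--     total = sum(works)
--     if total <= n:
--         return 0
--     q, r = divmod(total - n, len(works))
--     return r * (q + 1) ** 2 + (len(works) - r) * q ** 2
-- ===== Notes on version B (the rewrite author's own statement) =====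
-- stated objective: simpler
-- what changed: Replaces the bucket list, the increment loop and the squaring loop by the closed form r*(q+1)^2 + (m-r)*q^2 with q, r = divmod(total-n, m) (the O(m) sum of works remains).
import Mathlib
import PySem

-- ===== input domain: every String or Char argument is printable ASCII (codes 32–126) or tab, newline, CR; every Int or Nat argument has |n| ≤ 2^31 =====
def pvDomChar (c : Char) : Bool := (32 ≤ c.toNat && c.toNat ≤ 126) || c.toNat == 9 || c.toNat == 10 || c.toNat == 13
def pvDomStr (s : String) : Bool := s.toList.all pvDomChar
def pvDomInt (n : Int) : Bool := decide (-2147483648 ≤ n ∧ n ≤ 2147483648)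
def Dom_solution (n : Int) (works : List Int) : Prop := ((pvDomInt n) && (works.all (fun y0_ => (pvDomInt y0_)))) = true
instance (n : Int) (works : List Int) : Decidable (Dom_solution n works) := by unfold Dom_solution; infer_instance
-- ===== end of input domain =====

-- B replaces A's bucket list and its two loops by the closed form r*(q+1)^2 + (m-r)*q^2.

-- ===== PORT A =====
-- Inside Pre_ every index i of the loop satisfies 0 ≤ i < len(rest), so pyGetD/pySetD
-- are exact for Python's rest[i] += 1 (which never raises there).
def solution (n : Int) (works : List Int) : Int :=
  let total := works.sum
  if total ≤ n then 0
  else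
    let total := total - n
    let rest := List.replicate works.length (PySem.Int.floordiv total (works.length : Int))
    let rest := (PySem.List.pyRange 0 (PySem.Int.mod total (works.length : Int)) 1).foldl
      (fun r i => PySem.List.pySetD r i (PySem.List.pyGetD r i 0 + 1)) rest
    rest.foldl (fun answer num => answer + num ^ 2) 0

-- ===== PORT B =====
def solution_alt (n : Int) (works : List Int) : Int :=
  let total := works.sum
  if total ≤ n then 0
  else
    let m := (works.length : Int)
    let q := PySem.Int.floordiv (total - n) m
    let r := PySem.Int.mod (total - n) m
    r * (q + 1) ^ 2 + (m - r) * q ^ 2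

-- ===== PRECONDITION & SPEC =====
-- Pre_ excludes only the inputs where Python A raises ZeroDivisionError:
-- works = [] with sum(works) > n (B raises there too).
def Pre_solution (n : Int) (works : List Int) : Prop := works ≠ [] ∨ works.sum ≤ n
instance (n : Int) (works : List Int) : Decidable (Pre_solution n works) := by
  unfold Pre_solution; infer_instance
def pvWitness_solution : Int × List Int := (3, [4, 3, 3])
def Spec_solution (n : Int) (works : List Int) (out : Int) : Prop := out = solution_alt n works
instance (n : Int) (works : List Int) (out : Int) : Decidable (Spec_solution n works out) := by unfold Spec_solution; infer_instance

-- ===== CLAIM (what is proved, stated in full; the proofs are below) =====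
def Claim_equal_solution : Prop := ∀ (n : Int) (works : List Int), Dom_solution n works → Pre_solution n works → Spec_solution n works (solution n works)

-- ===== LEMMAS AND PROOFS =====

-- After the increment loop the bucket list is r copies of q+1 followed by m-r copies of q.
theorem pv_loop_eq (m r : Nat) (q : Int) (h : r ≤ m) :
    (PySem.List.pyRange 0 (r : Int) 1).foldl
      (fun l i => PySem.List.pySetD l i (PySem.List.pyGetD l i 0 + 1)) (List.replicate m q)
      = List.replicate r (q + 1) ++ List.replicate (m - r) q := by
  induction r with
  | zero => simp
  | succ r ih =>
    have hr : r ≤ m := Nat.le_of_succ_le h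
    have hlt : r < m := h
    have : ((r + 1 : Nat) : Int) = (r : Int) + 1 := by push_cast; ring
    rw [this, PySem.List.pyRange_one_succ_right (by positivity), List.foldl_append,
        ih hr]
    simp only [List.foldl_cons, List.foldl_nil]
    -- index r hits the first copy of q in the tail
    have hmr : m - r = (m - (r + 1)) + 1 := by omega
    rw [hmr, List.replicate_succ]
    have hget : PySem.List.pyGetD
        (List.replicate r (q + 1) ++ q :: List.replicate (m - (r + 1)) q) (r : Int) 0 = q := by
      rw [PySem.List.pyGetD_natCast]
      simp [List.getD]
    rw [hget, PySem.List.pySetD_natCast]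
    rw [show (r : Nat) = (List.replicate r (q + 1)).length + 0 by simp]
    rw [List.set_append_right _ _ (by simp)]
    simp [List.replicate_succ']
  
-- Sum of squares of the bucket list, in closed form.
theorem pv_sq_sum (a b : Nat) (x y : Int) :
    (List.replicate a x ++ List.replicate b y).foldl (fun answer num => answer + num ^ 2) 0
      = (a : Int) * x ^ 2 + (b : Int) * y ^ 2 := by
  rw [PySem.List.foldl_add (l := List.replicate a x ++ List.replicate b y) (a := 0) (fun num => num ^ 2)]
  simp [List.sum_replicate]

-- ===== VERDICT (by name: the statement is the Claim_ definition above) =====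
theorem solution_spec : Claim_equal_solution := by
  intro n works _ hpre
  unfold Spec_solution solution solution_alt
  simp only []
  by_cases hle : works.sum ≤ n
  · simp [hle]
  · simp only [if_neg hle]
    rcases hpre with hne | h
    · have hm : 0 < works.length := List.length_pos_iff.mpr hne
      have hmZ : (0 : Int) < (works.length : Int) := by exact_mod_cast hm
      set t := works.sum - n with ht
      set q := PySem.Int.floordiv t (works.length : Int) with hq
      have hr0 : 0 ≤ PySem.Int.mod t (works.length : Int) := PySem.Int.mod_nonneg t hmZ
      have hrlt : PySem.Int.mod t (works.length : Int) < (works.length : Int) :=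
        PySem.Int.mod_lt t hmZ
      set R := (PySem.Int.mod t (works.length : Int)).toNat with hR
      have hcast : (PySem.Int.mod t (works.length : Int)) = (R : Int) := by omega
      have hRle : R ≤ works.length := by omega
      rw [hcast, pv_loop_eq works.length R q hRle, pv_sq_sum]
      have : ((works.length - R : Nat) : Int) = (works.length : Int) - (R : Int) := by
        push_cast [Nat.cast_sub hRle]; ring
      rw [this]
    · exact absurd h hle
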